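-- pv_equiv track=rewrite | github.com/jiali1025/Computational-intelligence-for-soft-strain-sensor-sustainability | cycling attenuation/shap/Durability_Transformer_Shap.py | train_dev_data
-- ===== SOURCE A (Python) =====
-- def train_dev_data(x_set):
--     X = []
--     deX = []
--     for i in range(len(x_set)):
--         if i % 10 != 0:
--             x_data = x_set[i]
--             X.append(x_data)
--         else:
--             devX = x_set[i]
--             deX.append(devX)
--     return X, deX
-- ===== SOURCE B (Python) =====
-- def train_dev_data(x_set):
--     deX = list(x_set[::10])
--     X = []
--     for start in range(0, len(x_set), 10):
--         X.extend(x_set[start + 1:start + 10])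
--     return X, deX
-- ===== Notes on version B (the rewrite author's own statement) =====
-- stated objective: alternative
-- what changed: B computes the dev split directly as the strided slice x_set[::10] and builds the train split by extending with each ten-element chunk's tail slice x_set[start+1:start+10], instead of A's per-index loop that tests i % 10 for every index and appends element by element.
import Mathlib
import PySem

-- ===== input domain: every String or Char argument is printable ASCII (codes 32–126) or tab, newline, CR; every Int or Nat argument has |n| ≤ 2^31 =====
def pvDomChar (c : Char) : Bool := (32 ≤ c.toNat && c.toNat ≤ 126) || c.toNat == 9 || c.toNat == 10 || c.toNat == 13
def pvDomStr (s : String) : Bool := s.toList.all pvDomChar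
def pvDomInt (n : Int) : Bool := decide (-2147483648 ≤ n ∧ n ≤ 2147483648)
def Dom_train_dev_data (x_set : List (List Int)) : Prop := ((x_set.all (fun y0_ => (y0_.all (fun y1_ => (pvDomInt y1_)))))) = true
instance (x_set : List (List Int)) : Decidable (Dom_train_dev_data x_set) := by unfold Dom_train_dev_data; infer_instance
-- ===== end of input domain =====

-- B takes the dev split as the strided slice x_set[::10] and extends the train split with each
-- chunk's tail slice, instead of A's per-index loop testing i % 10 (objective: alternative).

-- ===== PORT A =====
-- literal port of A: loop over range(len(x_set)), branch on i % 10, append to X or deX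
def train_dev_data (x_set : List (List Int)) : List (List Int) × List (List Int) :=
  (PySem.List.pyRange 0 (PySem.List.len x_set) 1).foldl
    (fun (st : List (List Int) × List (List Int)) i =>
      if PySem.Int.mod i 10 ≠ 0 then
        (st.1 ++ [PySem.List.pyGetD x_set i []], st.2)   -- x_data = x_set[i]; X.append(x_data)  (i in range, so pyGetD is exact)
      else
        (st.1, st.2 ++ [PySem.List.pyGetD x_set i []]))  -- devX = x_set[i]; deX.append(devX)
    ([], [])

-- ===== PORT B =====
-- literal port of B: deX = list(x_set[::10]); then for start in range(0, len, 10): X.extend(x_set[start+1:start+10])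
def train_dev_data_alt (x_set : List (List Int)) : List (List Int) × List (List Int) :=
  let deX := (PySem.List.slice? x_set none none 10).getD []  -- step 10 ≠ 0, so slice? is some; getD is exact
  let X := (PySem.List.pyRange 0 (PySem.List.len x_set) 10).foldl
      (fun X start => X ++ PySem.List.slice x_set (some (start + 1)) (some (start + 10))) []
  (X, deX)

-- ===== PRECONDITION & SPEC =====
def Spec_train_dev_data (x_set : List (List Int)) (out : List (List Int) × List (List Int)) : Prop := out = train_dev_data_alt x_set
instance (x_set : List (List Int)) (out : List (List Int) × List (List Int)) : Decidable (Spec_train_dev_data x_set out) := by unfold Spec_train_dev_data; infer_instance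

-- ===== CLAIM (what is proved, stated in full; the proofs are below) =====
def Claim_equal_train_dev_data : Prop := ∀ (x_set : List (List Int)), Dom_train_dev_data x_set → Spec_train_dev_data x_set (train_dev_data x_set)

-- ===== LEMMAS AND PROOFS =====

-- common chunked description of both programs (proof helper only)
def chunkSplit : List (List Int) → List (List Int) × List (List Int)
  | [] => ([], [])
  | h :: t =>
    let r := chunkSplit (t.drop 9)
    (t.take 9 ++ r.1, h :: r.2)
  termination_by l => l.length
  decreasing_by simp

theorem pymod_ten (i : Int) : PySem.Int.mod i 10 = i % 10 := by
  simp [PySem.Int.mod, Int.fmod_eq_emod]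

-- A's loop body as filter/map, with the pair accumulator made explicit
theorem foldA (g : Int → List Int) (l : List Int) (a b : List (List Int)) :
    l.foldl
      (fun (st : List (List Int) × List (List Int)) i =>
        if i % 10 ≠ 0 then (st.1 ++ [g i], st.2) else (st.1, st.2 ++ [g i]))
      (a, b)
    = (a ++ (l.filter (fun i => !(i % 10 == 0))).map g,
       b ++ (l.filter (fun i => i % 10 == 0)).map g) := by
  induction l generalizing a b with
  | nil => simp
  | cons i l ih =>
    simp only [List.foldl_cons]
    by_cases h : i % 10 = 0
    · rw [if_neg (by omega)]
      rw [ih]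
      simp [h]
    · rw [if_pos h]
      rw [ih]
      simp [h]

theorem pyRange_ten_nil {a b : Int} (h : b ≤ a) : PySem.List.pyRange a b 10 = [] := by
  rw [PySem.List.pyRange_of_pos a b (by norm_num)]
  simp [show ¬ a < b by omega]

theorem pyRange_ten_cons {a b : Int} (h : a < b) :
    PySem.List.pyRange a b 10 = a :: PySem.List.pyRange (a + 10) b 10 := by
  rw [PySem.List.pyRange_of_pos a b (by norm_num),
      PySem.List.pyRange_of_pos (a + 10) b (by norm_num)]
  have hm : (if a < b then ((b - a + 10 - 1) / 10).toNat else 0)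
      = (if a + 10 < b then ((b - (a + 10) + 10 - 1) / 10).toNat else 0) + 1 := by
    split_ifs <;> omega
  rw [hm, List.range_succ_eq_map]
  simp [List.map_map, Function.comp]
  intro k _
  ring

-- map of pyGetD over a contiguous index range is a segment of the list
theorem map_getD_seg (full : List (List Int)) (k : Nat) :
    ∀ (a b : Int), 0 ≤ a → b - a = (k : Int) → b ≤ (full.length : Int) →
    (PySem.List.pyRange a b 1).map (fun j => PySem.List.pyGetD full j ([] : List Int))
      = (full.drop a.toNat).take k := by
  induction k with
  | zero =>
    intro a b h0 hk _
    rw [PySem.List.pyRange_one_eq_nil (by omega)]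
    simp
  | succ k ih =>
    intro a b h0 hk hb
    rw [PySem.List.pyRange_one_cons (by omega)]
    have hrec := ih (a + 1) b (by omega) (by omega) hb
    simp only [List.map_cons, hrec]
    have hlt : a.toNat < full.length := by omega
    have hget : PySem.List.pyGetD full a [] = full[a.toNat] := by
      rw [PySem.List.pyGetD_of_nonneg full [] h0]
      exact List.getD_eq_getElem full [] hlt
    have hdrop : full.drop a.toNat = full[a.toNat] :: full.drop (a + 1).toNat := by
      have : (a + 1).toNat = a.toNat + 1 := by omega
      rw [this]
      exact (List.drop_eq_getElem_cons hlt)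
    rw [hget, hdrop]
    simp

theorem A_chunk : ∀ (n : Nat) (xs full : List (List Int)) (a : Int),
    0 ≤ a → a % 10 = 0 → xs = full.drop a.toNat → xs.length = n →
    ((PySem.List.pyRange a (PySem.List.len full) 1).filter (fun i => !(i % 10 == 0))).map
        (fun j => PySem.List.pyGetD full j ([] : List Int)) = (chunkSplit xs).1
    ∧ ((PySem.List.pyRange a (PySem.List.len full) 1).filter (fun i => i % 10 == 0)).map
        (fun j => PySem.List.pyGetD full j ([] : List Int)) = (chunkSplit xs).2 := by
  intro n
  induction n using Nat.strong_induction_on with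
  | _ n ih =>
    intro xs full a h0 h10 hxs hlen
    have hlenfull : PySem.List.len full = (full.length : Int) := by
      simp [PySem.List.len]
    by_cases hab : PySem.List.len full ≤ a
    · have hxnil : xs = [] := by
        rw [hxs]
        apply List.drop_eq_nil_of_le
        omega
      rw [PySem.List.pyRange_one_eq_nil hab, hxnil]
      simp [chunkSplit]
    · rw [not_le] at hab
      obtain ⟨h, t, hht⟩ : ∃ h t, xs = h :: t := by
        cases xs with
        | nil =>
          exfalso
          have : full.length - a.toNat = 0 := by
            have := congrArg List.length hxs
            simpa using this.symm
          omega
        | cons h t => exact ⟨h, t, rfl⟩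
      have hlent : (t.length : Int) = PySem.List.len full - a - 1 := by
        have := congrArg List.length hxs
        rw [hht] at this
        simp at this
        omega
      have hget : PySem.List.pyGetD full a ([] : List Int) = h := by
        rw [PySem.List.pyGetD_of_nonneg full [] h0]
        have h5 : (full.drop a.toNat)[(0 : Nat)]? = some h := by
          rw [← hxs, hht]; rfl
        rw [List.getElem?_drop] at h5
        simp only [Nat.add_zero] at h5
        simp [List.getD, h5]
      have hdrop1 : full.drop (a + 1).toNat = t := by
        have h6 : (a + 1).toNat = a.toNat + 1 := by omega
        rw [h6, ← List.drop_drop, ← hxs, hht]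
        rfl
      have hcs : chunkSplit xs = (t.take 9 ++ (chunkSplit (t.drop 9)).1, h :: (chunkSplit (t.drop 9)).2) := by
        rw [hht, chunkSplit]
      by_cases hm : a + 10 ≤ PySem.List.len full
      · -- a full chunk of ten indices, then recurse
        rw [PySem.List.pyRange_one_append a (a + 10) (PySem.List.len full) (by omega) hm,
            PySem.List.pyRange_one_cons (show a < a + 10 by omega)]
        have hkeep : (PySem.List.pyRange (a + 1) (a + 10) 1).filter (fun i => !(i % 10 == 0))
            = PySem.List.pyRange (a + 1) (a + 10) 1 := by
          apply List.filter_eq_self.mpr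
          intro x hx
          rw [PySem.List.mem_pyRange_one] at hx
          simp only [Bool.not_eq_eq_eq_not, Bool.not_true, beq_eq_false_iff_ne, ne_eq]
          omega
        have hdrop0 : (PySem.List.pyRange (a + 1) (a + 10) 1).filter (fun i => i % 10 == 0) = [] := by
          apply List.filter_eq_nil_iff.mpr
          intro x hx
          rw [PySem.List.mem_pyRange_one] at hx
          simp only [beq_iff_eq]
          omega
        have hseg : (PySem.List.pyRange (a + 1) (a + 10) 1).map
            (fun j => PySem.List.pyGetD full j ([] : List Int)) = t.take 9 := by
          rw [map_getD_seg full 9 (a + 1) (a + 10) (by omega) (by omega) (by omega), hdrop1]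
        have hdd : full.drop (a + 10).toNat = t.drop 9 := by
          have h7 : (a + 10).toNat = a.toNat + 10 := by omega
          rw [h7, ← List.drop_drop, ← hxs, hht]
          rfl
        have hrec := ih (t.drop 9).length (by rw [hht] at hlen; simp at hlen ⊢; omega)
          (t.drop 9) full (a + 10) (by omega) (by omega) hdd.symm rfl
        rw [hcs]
        constructor
        · rw [List.filter_append, List.filter_cons_of_neg (by simp [h10]), hkeep,
              List.map_append, hseg, hrec.1]
        · rw [List.filter_append, List.filter_cons_of_pos (by simp [h10]), hdrop0,
              List.cons_append, List.nil_append, List.map_cons, hget, hrec.2]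
      · -- last, short chunk: the whole remaining range is one chunk
        rw [not_le] at hm
        rw [PySem.List.pyRange_one_cons hab]
        have hkeep : (PySem.List.pyRange (a + 1) (PySem.List.len full) 1).filter (fun i => !(i % 10 == 0))
            = PySem.List.pyRange (a + 1) (PySem.List.len full) 1 := by
          apply List.filter_eq_self.mpr
          intro x hx
          rw [PySem.List.mem_pyRange_one] at hx
          simp only [Bool.not_eq_eq_eq_not, Bool.not_true, beq_eq_false_iff_ne, ne_eq]
          omega
        have hdrop0 : (PySem.List.pyRange (a + 1) (PySem.List.len full) 1).filter (fun i => i % 10 == 0) = [] := by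
          apply List.filter_eq_nil_iff.mpr
          intro x hx
          rw [PySem.List.mem_pyRange_one] at hx
          simp only [beq_iff_eq]
          omega
        have hseg : (PySem.List.pyRange (a + 1) (PySem.List.len full) 1).map
            (fun j => PySem.List.pyGetD full j ([] : List Int)) = t := by
          rw [map_getD_seg full t.length (a + 1) (PySem.List.len full) (by omega) (by omega) (by omega),
              hdrop1, List.take_length]
        have htshort : (t.length : Int) ≤ 9 := by omega
        have ht9 : t.take 9 = t := List.take_of_length_le (by omega)
        have htd9 : t.drop 9 = [] := List.drop_eq_nil_of_le (by omega)
        rw [hcs, htd9]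
        constructor
        · rw [List.filter_cons_of_neg (by simp [h10]), hkeep, hseg, ht9]
          simp [chunkSplit]
        · rw [List.filter_cons_of_pos (by simp [h10]), hdrop0, List.map_cons, hget]
          simp [chunkSplit]

-- B's two passes in chunked form: train via flatMap of tail slices, dev via map of chunk heads
theorem B_chunk : ∀ (n : Nat) (xs full : List (List Int)) (a : Int),
    0 ≤ a → a % 10 = 0 → xs = full.drop a.toNat → xs.length = n →
    ((PySem.List.pyRange a (PySem.List.len full) 10).flatMap
        (fun i => PySem.List.slice full (some (i + 1)) (some (i + 10))) = (chunkSplit xs).1)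
    ∧ ((PySem.List.pyRange a (PySem.List.len full) 10).map
        (fun i => PySem.List.pyGetD full i ([] : List Int)) = (chunkSplit xs).2) := by
  intro n
  induction n using Nat.strong_induction_on with
  | _ n ih =>
    intro xs full a h0 h10 hxs hlen
    have hlenfull : PySem.List.len full = (full.length : Int) := by
      simp [PySem.List.len]
    by_cases hab : PySem.List.len full ≤ a
    · have hxnil : xs = [] := by
        rw [hxs]
        apply List.drop_eq_nil_of_le
        omega
      rw [pyRange_ten_nil hab, hxnil]
      simp [chunkSplit]
    · rw [not_le] at hab
      obtain ⟨h, t, hht⟩ : ∃ h t, xs = h :: t := by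
        cases xs with
        | nil =>
          exfalso
          have : full.length - a.toNat = 0 := by
            have := congrArg List.length hxs
            simpa using this.symm
          omega
        | cons h t => exact ⟨h, t, rfl⟩
      have hget : PySem.List.pyGetD full a ([] : List Int) = h := by
        rw [PySem.List.pyGetD_of_nonneg full [] h0]
        have h5 : (full.drop a.toNat)[(0 : Nat)]? = some h := by
          rw [← hxs, hht]; rfl
        rw [List.getElem?_drop] at h5
        simp only [Nat.add_zero] at h5
        simp [List.getD, h5]
      have hdrop1 : full.drop (a + 1).toNat = t := by
        have h6 : (a + 1).toNat = a.toNat + 1 := by omega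
        rw [h6, ← List.drop_drop, ← hxs, hht]
        rfl
      have hslice : PySem.List.slice full (some (a + 1)) (some (a + 10)) = t.take 9 := by
        rw [PySem.List.slice_toNat full (by omega) (by omega), hdrop1]
        congr 1
        omega
      have hdd : full.drop (a + 10).toNat = t.drop 9 := by
        have h7 : (a + 10).toNat = a.toNat + 10 := by omega
        rw [h7, ← List.drop_drop, ← hxs, hht]
        rfl
      have hrec := ih (t.drop 9).length (by rw [hht] at hlen; simp at hlen ⊢; omega)
        (t.drop 9) full (a + 10) (by omega) (by omega) hdd.symm rfl
      have hcs : chunkSplit xs = (t.take 9 ++ (chunkSplit (t.drop 9)).1, h :: (chunkSplit (t.drop 9)).2) := by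
        rw [hht, chunkSplit]
      rw [pyRange_ten_cons hab, hcs]
      constructor
      · rw [List.flatMap_cons, hslice, hrec.1]
      · rw [List.map_cons, hget, hrec.2]

-- x_set[::10] is exactly the pyGetD values at the stride-10 range of indices
theorem slice_ten (xs : List (List Int)) :
    PySem.List.slice? xs none none 10
      = some ((PySem.List.pyRange 0 (PySem.List.len xs) 10).map
          (fun i => PySem.List.pyGetD xs i ([] : List Int))) := by
  rw [PySem.List.pyRange_of_pos 0 (PySem.List.len xs) (by norm_num)]
  have hlen : PySem.List.len xs = (xs.length : Int) := by simp [PySem.List.len]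
  simp only [PySem.List.slice?, PySem.List.sliceIndices, hlen]
  norm_num
  rw [List.filterMap_eq_map_iff_forall_eq_some.mpr]
  intro k hk
  rw [List.mem_range] at hk
  have hkn : 10 * k < xs.length := by
    by_cases hpos : 0 < xs.length
    · rw [if_pos hpos] at hk; omega
    · rw [if_neg hpos] at hk; omega
  have h1 : ((10 : Int) * (k : Int)).toNat = 10 * k := by omega
  have h2 : PySem.List.pyGetD xs ((10 : Int) * (k : Int)) ([] : List Int) = xs[10 * k] := by
    rw [PySem.List.pyGetD_of_nonneg xs [] (by omega), h1]
    exact List.getD_eq_getElem xs [] hkn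
  simp [Function.comp, h1, h2, List.getElem?_eq_getElem hkn]

-- ===== VERDICT (by name: the statement is the Claim_ definition above) =====
theorem train_dev_data_spec : Claim_equal_train_dev_data := by
  intro xs _
  unfold Spec_train_dev_data train_dev_data train_dev_data_alt
  simp only [pymod_ten]
  rw [foldA (fun j => PySem.List.pyGetD xs j []) _ [] []]
  have hA := A_chunk xs.length xs xs 0 le_rfl rfl (by simp) rfl
  have hB := B_chunk xs.length xs xs 0 le_rfl rfl (by simp) rfl
  simp only [List.nil_append, slice_ten, Option.getD_some,
             PySem.List.foldl_append_eq_flatMap]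
  rw [hA.1, hA.2, hB.1, hB.2]
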